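-- pv_equiv track=rewrite | github.com/2tony2/helaicopter | python/helaicopter_api/application/conversations.py | _project_display_name
-- ===== SOURCE A (Python) =====
-- def _project_display_name(project_path: str) -> str:
--     if project_path.startswith("codex:"):
--         return f"Codex/{_project_display_name(project_path[len('codex:'):])}"
--     if project_path.startswith("-"):
--         segments = project_path.replace("-", "/").lstrip("/").split("/")
--         filtered = [segment for segment in segments if segment]
--         start_index = next(
--             (
--                 index
--                 for index, segment in enumerate(filtered)
--                 if index >= 2 and segment not in {"Users", "Documents"}
--             ),
--             0,
--         )
--         return "/".join(filtered[max(start_index, 0) :][-3:])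
--     return project_path
-- ===== SOURCE B (Python) =====
-- def _project_display_name(project_path: str) -> str:
--     # Iterative version: count and strip all leading "codex:" prefixes, apply
--     # the tail logic once, then prepend "Codex/" per stripped prefix.
--     depth = 0
--     while project_path.startswith("codex:"):
--         project_path = project_path[6:]
--         depth += 1
--     if project_path.startswith("-"):
--         # One character pass splitting on '-' and '/' and dropping empty pieces.
--         tokens = []
--         cur = ""
--         for ch in project_path:
--             if ch == "-" or ch == "/":
--                 if cur:
--                     tokens.append(cur)
--                 cur = ""
--             else:
--                 cur += ch
--         if cur:
--             tokens.append(cur)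
--         start = 0
--         for i in range(2, len(tokens)):
--             if tokens[i] != "Users" and tokens[i] != "Documents":
--                 start = i
--                 break
--         project_path = "/".join(tokens[start:][-3:])
--     return "Codex/" * depth + project_path
-- ===== Notes on version B (the rewrite author's own statement) =====
-- stated objective: alternative
-- what changed: The tail recursion peeling codex prefixes becomes an explicit counting loop, and the replace/lstrip/split/filter pipeline plus enumerate-based generator is replaced by a single character-level tokenizer pass and an index loop with break.
import Mathlib
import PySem

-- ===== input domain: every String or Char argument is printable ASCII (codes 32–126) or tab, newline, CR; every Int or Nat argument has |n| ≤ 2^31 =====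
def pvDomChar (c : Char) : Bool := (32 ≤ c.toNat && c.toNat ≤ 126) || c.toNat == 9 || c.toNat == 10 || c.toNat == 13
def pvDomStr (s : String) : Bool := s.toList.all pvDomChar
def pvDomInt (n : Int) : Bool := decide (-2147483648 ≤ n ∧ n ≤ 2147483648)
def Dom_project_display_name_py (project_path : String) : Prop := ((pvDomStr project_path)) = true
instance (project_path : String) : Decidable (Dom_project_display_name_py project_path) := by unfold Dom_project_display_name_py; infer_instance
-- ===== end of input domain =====

-- B replaces A's tail recursion over "codex:" prefixes by a counting loop and A's
-- replace/lstrip/split/filter pipeline plus enumerate-generator by a single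
-- character-level tokenizer pass and an index loop (alternative decomposition, same cost).

-- ===== PORT A =====
-- termination helper for the recursive peel: s[6:] is shorter when s starts with "codex:"
theorem pvSliceSixLt (s : String) (h : PySem.Str.startswith s "codex:" = true) :
    (PySem.Str.slice s (some 6) none).toList.length < s.toList.length := by
  have ht : (PySem.Str.slice s (some 6) none).toList = s.toList.drop (6:Int).toNat := by
    rw [PySem.Str.toList_slice, PySem.Chars.slice_eq_listSlice,
       PySem.List.slice_from s.toList (by norm_num : (0:Int) ≤ 6)]
  rw [ht, List.length_drop]
  have hpre : "codex:".toList.isPrefixOf s.toList = true := by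
    simpa [PySem.Str.startswith, PySem.Chars.startswith] using h
  have hle : ("codex:".toList).length ≤ s.toList.length :=
    List.IsPrefix.length_le (List.isPrefixOf_iff_prefix.mp hpre)
  have h6 : ("codex:".toList).length = 6 := by decide
  omega

def project_display_name_py (project_path : String) : String :=
  if PySem.Str.startswith project_path "codex:" then
    -- f"Codex/{_project_display_name(project_path[len('codex:'):])}"
    "Codex/" ++ project_display_name_py (PySem.Str.slice project_path (some 6) none)
  else if PySem.Str.startswith project_path "-" then
    -- project_path.replace("-", "/").lstrip("/").split("/")
    -- (lstrip("/") ported by hand as dropWhile (· == '/'): exact — Python's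
    --  str.lstrip(chars) removes exactly the leading characters in chars;
    --  split("/") with nonempty sep is PySem.Chars.splitOn)
    let segments := (PySem.Chars.splitOn
        (((PySem.Str.replace project_path "-" "/").toList).dropWhile (fun c => c == '/'))
        "/".toList).map String.ofList
    -- [segment for segment in segments if segment]
    let filtered := segments.filter (fun seg => !(seg == ""))
    -- next((index for index, segment in enumerate(filtered) if index >= 2 and
    --       segment not in {"Users", "Documents"}), 0)
    let start_index := (((PySem.List.enumerate filtered 0).find?
        (fun p => decide ((2:Int) ≤ p.1) && !(p.2 == "Users") && !(p.2 == "Documents"))).map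
        (·.1)).getD 0
    -- "/".join(filtered[max(start_index, 0):][-3:])
    PySem.Str.join "/"
      (PySem.List.slice (PySem.List.slice filtered (some (max start_index 0)) none)
        (some (-3)) none)
  else project_path
termination_by project_path.toList.length
decreasing_by exact pvSliceSixLt project_path (by assumption)

-- ===== PORT B =====
-- while project_path.startswith("codex:"): strip and count
def pvWhilePeel (s : String) (depth : Nat) : String × Nat :=
  if PySem.Str.startswith s "codex:" then
    pvWhilePeel (PySem.Str.slice s (some 6) none) (depth + 1)
  else (s, depth)
termination_by s.toList.length
decreasing_by exact pvSliceSixLt s (by assumption)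

-- the character pass: tokens/cur accumulator of Source B's for loop (cur kept as List Char)
def pvTok : List Char → List String → List Char → List String
  | [], tokens, cur => if cur.isEmpty then tokens else tokens ++ [String.ofList cur]
  | c :: rest, tokens, cur =>
    if c == '-' || c == '/' then
      if cur.isEmpty then pvTok rest tokens []
      else pvTok rest (tokens ++ [String.ofList cur]) []
    else pvTok rest tokens (cur ++ [c])

-- for i in range(2, len(tokens)): first i with tokens[i] not Users/Documents, else 0
def pvFindStart (tokens : List String) (i : Nat) : Nat :=
  if i < tokens.length then
    if !(tokens.getD i "" == "Users") && !(tokens.getD i "" == "Documents") then i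
    else pvFindStart tokens (i + 1)
  else 0
termination_by tokens.length - i

def project_display_name_py_alt (project_path : String) : String :=
  let (rest, depth) := pvWhilePeel project_path 0
  let rest :=
    if PySem.Str.startswith rest "-" then
      let tokens := pvTok rest.toList [] []
      let start := pvFindStart tokens 2
      PySem.Str.join "/"
        (PySem.List.slice (PySem.List.slice tokens (some (start : Int)) none) (some (-3)) none)
    else rest
  -- "Codex/" * depth + rest
  String.ofList (PySem.List.pyRepeat "Codex/".toList (depth : Int)) ++ rest

-- ===== PRECONDITION & SPEC =====
def Spec_project_display_name_py (project_path : String) (out : String) : Prop := out = project_display_name_py_alt project_path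
instance (project_path : String) (out : String) : Decidable (Spec_project_display_name_py project_path out) := by unfold Spec_project_display_name_py; infer_instance

-- ===== CLAIM (what is proved, stated in full; the proofs are below) =====
def Claim_equal_project_display_name_py : Prop := ∀ (project_path : String), Dom_project_display_name_py project_path → Spec_project_display_name_py project_path (project_display_name_py project_path)


-- ===== LEMMAS AND PROOFS =====

-- the sep predicate of B's tokenizer and the '-'→'/' replacement map
def pvQ (c : Char) : Bool := c == '-' || c == '/'
def pvR (c : Char) : Char := if c == '-' then '/' else c
def pvP (c : Char) : Bool := c == '/'

-- the common token spec both ports are reduced to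
def pvTokensSpec (l : List Char) : List String :=
  ((List.splitOnP pvQ l).filter (fun x => !x.isEmpty)).map String.ofList

theorem pvReplaceGo (fuel : Nat) : ∀ (l acc : List Char), l.length ≤ fuel →
    PySem.Chars.replace.go ['-'] ['/'] fuel l acc = acc.reverse ++ l.map pvR := by
  induction fuel with
  | zero =>
    intro l acc h
    have : l = [] := List.eq_nil_of_length_eq_zero (Nat.le_zero.mp h)
    subst this; simp [PySem.Chars.replace.go]
  | succ n ih =>
    intro l acc h
    cases l with
    | nil => simp [PySem.Chars.replace.go]
    | cons c t =>
      by_cases hc : c = '-'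
      · subst hc
        have hpre : List.isPrefixOf ['-'] ('-' :: t) = true := by simp [List.isPrefixOf]
        simp only [PySem.Chars.replace.go, hpre, if_true, List.length_cons, List.length_nil,
          Nat.zero_add, List.drop_succ_cons, List.drop_zero, List.reverse_cons,
          List.reverse_nil, List.nil_append, List.singleton_append]
        rw [ih t ('/' :: acc) (by simpa using Nat.lt_succ_iff.mp (by simpa using h))]
        simp [pvR]
      · have hpre : List.isPrefixOf ['-'] (c :: t) = false := by
          simp [List.isPrefixOf]
          exact fun h => hc h.symm
        simp only [PySem.Chars.replace.go, hpre]
        rw [ih t (c :: acc) (by simpa using Nat.lt_succ_iff.mp (by simpa using h))]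
        simp [pvR, hc]

theorem pvReplaceEq (l : List Char) : PySem.Chars.replace l ['-'] ['/'] = l.map pvR := by
  rw [PySem.Chars.replace]
  simp only [List.isEmpty_cons, if_false, Bool.false_eq_true]
  simpa using pvReplaceGo l.length l [] le_rfl

theorem pvSplitGo (fuel : Nat) : ∀ (l cur : List Char) (acc : List (List Char)), l.length ≤ fuel →
    PySem.Chars.splitOn.go ['/'] fuel l cur acc
      = acc.reverse ++ (List.splitOnP pvP l).modifyHead (cur.reverse ++ ·) := by
  induction fuel with
  | zero =>
    intro l cur acc h
    have : l = [] := List.eq_nil_of_length_eq_zero (Nat.le_zero.mp h)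
    subst this; simp [PySem.Chars.splitOn.go, List.splitOnP_nil]
  | succ n ih =>
    intro l cur acc h
    cases l with
    | nil => simp [PySem.Chars.splitOn.go, List.splitOnP_nil]
    | cons c t =>
      have ht : t.length ≤ n := Nat.lt_succ_iff.mp (by simpa using h)
      by_cases hc : c = '/'
      · subst hc
        have hpre : List.isPrefixOf ['/'] ('/' :: t) = true := by simp [List.isPrefixOf]
        simp only [PySem.Chars.splitOn.go, hpre, if_true, List.length_cons, List.length_nil,
          List.drop_succ_cons, List.drop_zero]
        rw [ih t [] (cur.reverse :: acc) ht]
        have hid : List.modifyHead (fun x : List Char => x) (List.splitOnP pvP t)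
            = List.splitOnP pvP t := by
          rcases hs : List.splitOnP pvP t with _ | ⟨x, xs⟩
          · rfl
          · simp
        simp [List.splitOnP_cons, pvP, hid]
      · have hpre : List.isPrefixOf ['/'] (c :: t) = false := by
          simp [List.isPrefixOf]
          exact fun h => hc h.symm
        simp only [PySem.Chars.splitOn.go, hpre]
        rw [ih t (c :: cur) acc ht]
        have hpc : pvP c = false := by simp [pvP, hc]
        simp only [List.splitOnP_cons, hpc, Bool.false_eq_true, if_false,
          List.modifyHead_modifyHead]
        congr 2
        funext x
        simp

theorem pvSplitEq (l : List Char) :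
    PySem.Chars.splitOn l ['/'] = List.splitOnP pvP l := by
  rw [PySem.Chars.splitOn, pvSplitGo (l.length + 1) l [] [] (by omega)]
  rcases h : List.splitOnP pvP l with _ | ⟨x, xs⟩
  · exact absurd h (List.splitOnP_ne_nil _ _)
  · simp

theorem pvSplitMap (l : List Char) :
    List.splitOnP pvP (l.map pvR) = (List.splitOnP pvQ l).map (List.map pvR) := by
  induction l with
  | nil => simp [List.splitOnP_nil]
  | cons c t ih =>
    have hpq : pvP (pvR c) = pvQ c := by
      by_cases h1 : c = '-' <;> by_cases h2 : c = '/' <;> simp [pvP, pvQ, pvR, h1, h2]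
    by_cases hq : pvQ c = true
    · simp only [List.map_cons, List.splitOnP_cons, hpq, hq, if_true, ih, List.map_cons]
      simp
    · rcases hs : List.splitOnP pvQ t with _ | ⟨x, xs⟩
      · exact absurd hs (List.splitOnP_ne_nil _ _)
      · simp only [List.map_cons, List.splitOnP_cons, hpq, hq, Bool.false_eq_true, if_false,
          ih, hs]
        simp

theorem pvPieces (l : List Char) : ∀ x ∈ List.splitOnP pvQ l, ∀ c ∈ x, pvQ c = false := by
  induction l with
  | nil =>
    intro x hx c hc
    simp [List.splitOnP_nil] at hx
    subst hx; simp at hc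
  | cons a t ih =>
    intro x hx c hc
    by_cases ha : pvQ a = true
    · simp only [List.splitOnP_cons, ha, if_true, List.mem_cons] at hx
      rcases hx with rfl | hx
      · simp at hc
      · exact ih x hx c hc
    · rcases hs : List.splitOnP pvQ t with _ | ⟨y, ys⟩
      · exact absurd hs (List.splitOnP_ne_nil _ _)
      · simp only [List.splitOnP_cons, ha, Bool.false_eq_true, if_false, hs,
          List.modifyHead_cons, List.mem_cons] at hx
        rcases hx with rfl | hx
        · rcases List.mem_cons.mp hc with rfl | hcy
          · simpa using ha
          · exact ih y (by simp [hs]) c hcy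
        · exact ih x (by simp [hs, hx]) c hc

theorem pvDropWhileFilter (l : List Char) :
    (List.splitOnP pvP (l.dropWhile pvP)).filter (fun x => !x.isEmpty)
      = (List.splitOnP pvP l).filter (fun x => !x.isEmpty) := by
  induction l with
  | nil => simp
  | cons c t ih =>
    by_cases hc : pvP c = true
    · rw [List.dropWhile_cons_of_pos hc]
      simp only [List.splitOnP_cons, hc, if_true, List.filter_cons]
      simpa using ih
    · rw [List.dropWhile_cons_of_neg (by simp [hc])]

theorem pvSplitAppend (cur l : List Char) (h : ∀ c ∈ cur, pvQ c = false) :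
    List.splitOnP pvQ (cur ++ l) = (List.splitOnP pvQ l).modifyHead (cur ++ ·) := by
  induction cur with
  | nil =>
    rcases hs : List.splitOnP pvQ l with _ | ⟨x, xs⟩
    · exact absurd hs (List.splitOnP_ne_nil _ _)
    · simp [hs]
  | cons a cs ih =>
    have ha : pvQ a = false := h a (by simp)
    have ih' := ih (fun c hc => h c (by simp [hc]))
    simp only [List.cons_append, List.splitOnP_cons, ha, Bool.false_eq_true, if_false, ih',
      List.modifyHead_modifyHead]
    rfl

theorem pvTokSpec : ∀ (l : List Char) (tokens : List String) (cur : List Char),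
    (∀ c ∈ cur, pvQ c = false) →
    pvTok l tokens cur
      = tokens ++ ((List.splitOnP pvQ (cur ++ l)).filter (fun x => !x.isEmpty)).map
          String.ofList := by
  intro l
  induction l with
  | nil =>
    intro tokens cur h
    rw [pvTok, pvSplitAppend cur [] h]
    simp only [List.splitOnP_nil, List.modifyHead_cons, List.append_nil, List.filter_cons]
    by_cases hc : cur.isEmpty = true <;> simp [hc]
  | cons c rest ih =>
    intro tokens cur h
    by_cases hq : (c == '-' || c == '/') = true
    · have hsplit : List.splitOnP pvQ (cur ++ c :: rest)
          = cur :: List.splitOnP pvQ rest := by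
        rw [pvSplitAppend cur (c :: rest) h, List.splitOnP_cons]
        simp only [pvQ, hq, if_true, List.modifyHead_cons, List.append_nil]
      rw [pvTok]
      simp only [hq, if_true]
      by_cases hc : cur.isEmpty
      · have hcur : cur = [] := by simpa using hc
        rw [if_pos hc, ih tokens [] (by simp), hsplit]
        simp [hcur]
      · have hce : cur.isEmpty = false := by simpa using hc
        rw [if_neg hc, ih (tokens ++ [String.ofList cur]) [] (by simp), hsplit]
        simp [hce]
    · rw [pvTok]
      simp only [hq, Bool.false_eq_true, if_false]
      rw [ih tokens (cur ++ [c]) ?_]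
      · congr 2
        rw [List.append_assoc]
        simp
      · intro d hd
        rcases List.mem_append.mp hd with hd | hd
        · exact h d hd
        · simp at hd; subst hd; simpa [pvQ] using hq

-- A's filtered list equals the token spec
theorem pvFilteredA (l : List Char) :
    ((PySem.Chars.splitOn ((PySem.Chars.replace l ['-'] ['/']).dropWhile (fun c => c == '/'))
        "/".toList).map String.ofList).filter (fun seg => !(seg == ""))
      = pvTokensSpec l := by
  have hsep : "/".toList = ['/'] := by decide
  rw [hsep, pvReplaceEq, pvSplitEq, List.filter_map]
  have hpred : ∀ x : List Char,
      ((fun seg => !(seg == "")) ∘ String.ofList) x = (fun x : List Char => !x.isEmpty) x := by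
    intro x
    cases x with
    | nil => simp
    | cons a t =>
      simp only [Function.comp_apply, List.isEmpty_cons, Bool.not_false]
      have : ¬ (String.ofList (a :: t) = "") := by
        intro hcontra
        have := congrArg String.toList hcontra
        simp at this
      simp [this]
  rw [List.filter_congr (fun x _ => hpred x)]
  show (List.filter _ (List.splitOnP pvP ((l.map pvR).dropWhile pvP))).map _ = _
  rw [pvDropWhileFilter, pvSplitMap]
  have hmapped : (List.splitOnP pvQ l).map (List.map pvR) = List.splitOnP pvQ l := by
    have hx : ∀ x ∈ List.splitOnP pvQ l, List.map pvR x = x := by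
      intro x hxm
      have h1 : ∀ c ∈ x, pvQ c = false := pvPieces l x hxm
      calc List.map pvR x = List.map id x := List.map_congr_left (fun c hc => by
            have h2 := h1 c hc
            simp only [pvQ, Bool.or_eq_false_iff, beq_eq_false_iff_ne, ne_eq] at h2
            simp [pvR, h2.1])
        _ = x := List.map_id x
    calc (List.splitOnP pvQ l).map (List.map pvR)
        = (List.splitOnP pvQ l).map id := List.map_congr_left (fun x hxm => hx x hxm)
      _ = _ := List.map_id _
  rw [hmapped, pvTokensSpec]

theorem pvTokensB (l : List Char) : pvTok l [] [] = pvTokensSpec l := by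
  simpa [pvTokensSpec] using pvTokSpec l [] [] (by simp)



-- B's index loop, as a structural scan used to connect both start computations
def pvGo : List String → Nat → Nat
  | [], _ => 0
  | t :: ts, i => if !(t == "Users") && !(t == "Documents") then i else pvGo ts (i + 1)

theorem pvFindStartEq (tokens : List String) : ∀ (i : Nat),
    pvFindStart tokens i = pvGo (tokens.drop i) i := by
  suffices h : ∀ (d i : Nat), tokens.length - i ≤ d →
      pvFindStart tokens i = pvGo (tokens.drop i) i by
    intro i; exact h (tokens.length - i) i le_rfl
  intro d
  induction d with
  | zero =>
    intro i h
    have hge : ¬ i < tokens.length := by omega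
    rw [pvFindStart, if_neg hge, List.drop_eq_nil_of_le (by omega)]
    rfl
  | succ n ihd =>
    intro i h
    by_cases hlt : i < tokens.length
    · rw [pvFindStart, if_pos hlt, List.drop_eq_getElem_cons hlt]
      have hget : tokens.getD i "" = tokens[i] := List.getD_eq_getElem tokens "" hlt
      rw [hget]
      by_cases hcond : (!(tokens[i] == "Users") && !(tokens[i] == "Documents")) = true
      · simp [pvGo, hcond]
      · simp only [pvGo, hcond, Bool.false_eq_true, if_false]
        exact ihd (i + 1) (by omega)
    · rw [pvFindStart, if_neg hlt, List.drop_eq_nil_of_le (by omega)]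
      rfl

theorem pvEnumFind (ts : List String) : ∀ (k : Nat), 2 ≤ k →
    ((((PySem.List.enumerate ts ((k : Nat) : Int)).find?
        (fun p => decide ((2:Int) ≤ p.1) && !(p.2 == "Users") && !(p.2 == "Documents"))).map
        (·.1)).getD 0) = ((pvGo ts k : Nat) : Int) := by
  induction ts with
  | nil => intro k hk; simp [PySem.List.enumerate, pvGo]
  | cons t ts ih =>
    intro k hk
    rw [PySem.List.enumerate_cons, List.find?_cons]
    have h2 : decide ((2:Int) ≤ ((k : Nat) : Int)) = true := by
      simp; exact_mod_cast hk
    by_cases hcond : (!(t == "Users") && !(t == "Documents")) = true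
    · have hb : (decide ((2:Int) ≤ ((k : Nat) : Int)) && !(t == "Users")
          && !(t == "Documents")) = true := by
        rw [h2, Bool.true_and, hcond]
      simp only [hb]
      simp [pvGo, hcond]
    · have hcf : (!(t == "Users") && !(t == "Documents")) = false := by
        simpa using hcond
      have hb : (decide ((2:Int) ≤ ((k : Nat) : Int)) && !(t == "Users")
          && !(t == "Documents")) = false := by
        rw [h2, Bool.true_and, hcf]
      simp only [hb]
      have hcast : ((k : Nat) : Int) + 1 = (((k + 1 : Nat)) : Int) := by push_cast; ring
      rw [hcast, ih (k + 1) (by omega)]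
      simp [pvGo, hcf]

theorem pvStartEq (ts : List String) :
    ((((PySem.List.enumerate ts 0).find?
        (fun p => decide ((2:Int) ≤ p.1) && !(p.2 == "Users") && !(p.2 == "Documents"))).map
        (·.1)).getD 0) = ((pvFindStart ts 2 : Nat) : Int) := by
  match ts with
  | [] =>
    rw [pvFindStart]
    simp [PySem.List.enumerate]
  | [t] =>
    rw [pvFindStart]
    simp [PySem.List.enumerate]
  | t0 :: t1 :: rest =>
    rw [PySem.List.enumerate_cons, PySem.List.enumerate_cons, List.find?_cons]
    have h0 : (fun p : Int × String =>
        decide ((2:Int) ≤ p.1) && !(p.2 == "Users") && !(p.2 == "Documents")) (0, t0)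
          = false := by simp
    have h1 : (fun p : Int × String =>
        decide ((2:Int) ≤ p.1) && !(p.2 == "Users") && !(p.2 == "Documents")) (0 + 1, t1)
          = false := by simp
    simp only [h0]
    rw [List.find?_cons]
    simp only [h1]
    have hcast : (0 : Int) + 1 + 1 = (((2 : Nat)) : Int) := by norm_num
    rw [hcast, pvEnumFind rest 2 le_rfl, pvFindStartEq (t0 :: t1 :: rest) 2]
    rfl

theorem pvNeTrue {b : Bool} (h : b = false) : ¬ b = true := by simp [h]

-- the loop-shift law of B's while loop
theorem pvWhilePeelShift : ∀ (n : Nat) (s : String), s.toList.length ≤ n → ∀ (d : Nat),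
    pvWhilePeel s d = ((pvWhilePeel s 0).1, d + (pvWhilePeel s 0).2) := by
  intro n
  induction n with
  | zero =>
    intro s hs d
    have hnil : s.toList = [] := List.eq_nil_of_length_eq_zero (Nat.le_zero.mp hs)
    have hsw : PySem.Str.startswith s "codex:" = false := by
      simp [PySem.Str.startswith, PySem.Chars.startswith, hnil]
    rw [pvWhilePeel, if_neg (pvNeTrue hsw), pvWhilePeel, if_neg (pvNeTrue hsw)]
    simp
  | succ n ih =>
    intro s hs d
    by_cases hsw : PySem.Str.startswith s "codex:" = true
    · have hlt := pvSliceSixLt s hsw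
      rw [pvWhilePeel, if_pos hsw]
      conv_rhs => rw [pvWhilePeel, if_pos hsw]
      rw [ih (PySem.Str.slice s (some 6) none) (by omega) (d + 1),
        ih (PySem.Str.slice s (some 6) none) (by omega) (0 + 1)]
      simp only [Prod.mk.injEq, true_and]
      omega
    · rw [pvWhilePeel, if_neg hsw, pvWhilePeel, if_neg hsw]
      simp

-- A's '-' branch rewritten to B's tokens and start index
theorem pvTailEq (s : String) (hnc : PySem.Str.startswith s "codex:" = false) :
    project_display_name_py s =
      (if PySem.Str.startswith s "-" then
        PySem.Str.join "/"
          (PySem.List.slice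
            (PySem.List.slice (pvTok s.toList [] [])
              (some ((pvFindStart (pvTok s.toList [] []) 2 : Nat) : Int)) none)
            (some (-3)) none)
      else s) := by
  rw [project_display_name_py]
  rw [if_neg (pvNeTrue hnc)]
  by_cases hd : PySem.Str.startswith s "-" = true
  · rw [if_pos hd, if_pos hd]
    have hrep : (PySem.Str.replace s "-" "/").toList
        = PySem.Chars.replace s.toList ['-'] ['/'] := by
      have h1 : "-".toList = ['-'] := by decide
      have h2 : "/".toList = ['/'] := by decide
      simp [PySem.Str.replace, h1, h2]
    simp only [hrep]
    rw [pvFilteredA s.toList, ← pvTokensB s.toList, pvStartEq (pvTok s.toList [] [])]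
    rw [max_eq_left (Int.natCast_nonneg _)]
  · rw [if_neg hd, if_neg hd]

theorem pvOfListAppend (l m : List Char) :
    String.ofList (l ++ m) = String.ofList l ++ String.ofList m := by simp

theorem pvCodexCons (d : Nat) (x : String) :
    "Codex/" ++ (String.ofList (PySem.List.pyRepeat "Codex/".toList ((d : Nat) : Int)) ++ x)
      = String.ofList (PySem.List.pyRepeat "Codex/".toList (((d + 1 : Nat)) : Int)) ++ x := by
  have h1 : PySem.List.pyRepeat "Codex/".toList (((d + 1 : Nat)) : Int)
      = "Codex/".toList ++ PySem.List.pyRepeat "Codex/".toList ((d : Nat) : Int) := by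
    simp [PySem.List.pyRepeat, List.replicate_succ]
  rw [h1]
  have h3 := pvOfListAppend "Codex/".toList
    (PySem.List.pyRepeat "Codex/".toList ((d : Nat) : Int))
  rw [h3, String.append_assoc]
  have h2 : ("Codex/" : String) = String.ofList "Codex/".toList := by decide
  rw [← h2]

-- B's value when no "codex:" prefix remains
theorem pvAltEq (s : String) (hsw : PySem.Str.startswith s "codex:" = false) :
    project_display_name_py_alt s =
      (if PySem.Str.startswith s "-" then
        PySem.Str.join "/"
          (PySem.List.slice
            (PySem.List.slice (pvTok s.toList [] [])
              (some ((pvFindStart (pvTok s.toList [] []) 2 : Nat) : Int)) none)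
            (some (-3)) none)
      else s) := by
  unfold project_display_name_py_alt
  rw [pvWhilePeel, if_neg (pvNeTrue hsw)]
  have h0 : PySem.List.pyRepeat "Codex/".toList (((0 : Nat)) : Int) = [] := by
    simp [PySem.List.pyRepeat]
  show String.ofList (PySem.List.pyRepeat "Codex/".toList (((0 : Nat)) : Int)) ++ _ = _
  rw [h0]
  have he : (String.ofList [] : String) = "" := by decide
  rw [he]
  simp

-- B peels one "codex:" prefix
theorem pvAltCodex (s : String) (hsw : PySem.Str.startswith s "codex:" = true) :
    project_display_name_py_alt s
      = "Codex/" ++ project_display_name_py_alt (PySem.Str.slice s (some 6) none) := by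
  unfold project_display_name_py_alt
  rw [pvWhilePeel, if_pos hsw,
    pvWhilePeelShift (PySem.Str.slice s (some 6) none).toList.length
      (PySem.Str.slice s (some 6) none) le_rfl (0 + 1)]
  show String.ofList (PySem.List.pyRepeat "Codex/".toList
      (((0 + 1 + (pvWhilePeel (PySem.Str.slice s (some 6) none) 0).2 : Nat)) : Int)) ++ _
    = _
  have hc : (0 + 1 + (pvWhilePeel (PySem.Str.slice s (some 6) none) 0).2 : Nat)
      = (pvWhilePeel (PySem.Str.slice s (some 6) none) 0).2 + 1 := by omega
  rw [hc, ← pvCodexCons]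

theorem pvMain : ∀ (n : Nat) (s : String), s.toList.length ≤ n →
    project_display_name_py s = project_display_name_py_alt s := by
  intro n
  induction n with
  | zero =>
    intro s hs
    have hnil : s.toList = [] := List.eq_nil_of_length_eq_zero (Nat.le_zero.mp hs)
    have hsw : PySem.Str.startswith s "codex:" = false := by
      simp [PySem.Str.startswith, PySem.Chars.startswith, hnil]
    rw [pvTailEq s hsw, pvAltEq s hsw]
  | succ n ih =>
    intro s hs
    by_cases hsw : PySem.Str.startswith s "codex:" = true
    · have hlt := pvSliceSixLt s hsw
      rw [project_display_name_py, if_pos hsw, pvAltCodex s hsw,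
        ih (PySem.Str.slice s (some 6) none) (by omega)]
    · have hsw' : PySem.Str.startswith s "codex:" = false := by
        simpa using hsw
      rw [pvTailEq s hsw', pvAltEq s hsw']

-- ===== VERDICT (by name: the statement is the Claim_ definition above) =====
theorem project_display_name_py_spec : Claim_equal_project_display_name_py := by
  intro s _
  unfold Spec_project_display_name_py
  exact pvMain s.toList.length s le_rfl
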